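-- pv_equiv track=rewrite | github.com/dylanbuchi/swissborg-scraper | classes/file_manager.py | _camel_case_to_human_readable
-- ===== SOURCE A (Python) =====
-- def _camel_case_to_human_readable(string: str):
--     result = []
--
--     index = 0
--
--     while (index < len(string)):
--         if string[index].isupper():
--             upper_letters = []
--             result.append(" ")
--             while (index < len(string) and string[index].isupper()):
--                 upper_letters.append(string[index])
--                 index += 1
--             result.append(''.join(upper_letters))
--         else:
--             result.append(string[index])
--             index += 1
--
--     return ''.join(result).title()
-- ===== SOURCE B (Python) =====
-- def _camel_case_to_human_readable(string: str):
--     # One flat pass with a look-back flag instead of an inner run-collecting loop.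
--     result = []
--     prev_upper = False
--     for c in string:
--         if c.isupper() and not prev_upper:
--             result.append(' ')
--         result.append(c)
--         prev_upper = c.isupper()
--     return ''.join(result).title()
-- ===== Notes on version B (the rewrite author's own statement) =====
-- stated objective: simpler
-- what changed: Replaces A's nested while loops (inner loop buffering each uppercase run into a separate list) with a single flat for-loop over the characters that decides per character, via one prev_upper look-back flag, whether to insert a space.
import Mathlib
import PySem

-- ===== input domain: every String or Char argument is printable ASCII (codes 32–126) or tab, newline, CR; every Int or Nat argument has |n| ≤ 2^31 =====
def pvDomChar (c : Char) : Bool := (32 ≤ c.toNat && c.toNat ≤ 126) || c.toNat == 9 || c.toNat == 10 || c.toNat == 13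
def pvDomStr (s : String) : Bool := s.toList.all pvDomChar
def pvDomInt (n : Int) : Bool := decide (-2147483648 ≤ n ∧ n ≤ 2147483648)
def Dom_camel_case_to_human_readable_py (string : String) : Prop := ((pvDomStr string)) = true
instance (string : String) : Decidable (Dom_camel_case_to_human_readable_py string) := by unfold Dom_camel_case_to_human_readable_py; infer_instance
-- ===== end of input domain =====

-- B replaces A's nested while loops (inner uppercase-run buffer) with one flat
-- pass using a prev_upper look-back flag; same O(n) cost, simpler decomposition.


-- str.title(), ported by hand (PySem has no title): a char is uppercased when it
-- is alphabetic and the previous char is not alphabetic, lowercased when both are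
-- alphabetic, else unchanged — exact on the ASCII domain (both ports call .title()).
def pyTitle (prevCased : Bool) : List Char → List Char
  | [] => []
  | c :: cs =>
    (if PySem.Chars.isalpha c then
       (if prevCased then PySem.Chars.lowerChar c else PySem.Chars.upperChar c)
     else c) :: pyTitle (PySem.Chars.isalpha c) cs

-- ===== PORT A =====
-- inner 'while index < len and string[index].isupper()': collect the uppercase
-- run (upper_letters) and return it with the remaining characters
def aRun : List Char → List Char × List Char
  | [] => ([], [])
  | c :: cs =>
    if PySem.Chars.isupper c then
      let pr := aRun cs
      (c :: pr.1, pr.2)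
    else ([], c :: cs)

theorem aRun_snd_length_le (cs : List Char) : (aRun cs).2.length ≤ cs.length := by
  induction cs with
  | nil => simp [aRun]
  | cons c cs ih =>
    simp only [aRun]
    split
    · exact Nat.le_succ_of_le ih
    · simp

-- outer while loop: the list of strings appended to 'result'
def aPieces : List Char → List (List Char)
  | [] => []
  | c :: cs =>
    if PySem.Chars.isupper c then
      -- result.append(" "); inner while collects the run starting at 'c'; result.append(run)
      [' '] :: (c :: (aRun cs).1) :: aPieces (aRun cs).2
    else
      [c] :: aPieces cs
termination_by cs => cs.length
decreasing_by
  · exact Nat.lt_succ_of_le (aRun_snd_length_le cs)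
  · simp

-- ''.join(result).title()
def camel_case_to_human_readable_py (string : String) : String :=
  String.ofList (pyTitle false (PySem.Chars.join [] (aPieces string.toList)))

-- ===== PORT B =====
-- single flat loop with the prev_upper flag
def bGo (prevUpper : Bool) : List Char → List Char
  | [] => []
  | c :: cs =>
    (if PySem.Chars.isupper c && !prevUpper then [' ', c] else [c]) ++
      bGo (PySem.Chars.isupper c) cs

def camel_case_to_human_readable_py_alt (string : String) : String :=
  String.ofList (pyTitle false (bGo false string.toList))

-- ===== PRECONDITION & SPEC =====
def Spec_camel_case_to_human_readable_py (string : String) (out : String) : Prop := out = camel_case_to_human_readable_py_alt string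
instance (string : String) (out : String) : Decidable (Spec_camel_case_to_human_readable_py string out) := by unfold Spec_camel_case_to_human_readable_py; infer_instance

-- ===== CLAIM (what is proved, stated in full; the proofs are below) =====
def Claim_equal_camel_case_to_human_readable_py : Prop := ∀ (string : String), Dom_camel_case_to_human_readable_py string → Spec_camel_case_to_human_readable_py string (camel_case_to_human_readable_py string)

-- ===== LEMMAS AND PROOFS =====
theorem join_nil_eq_flatten (l : List (List Char)) :
    PySem.Chars.join [] l = l.flatten := by
  induction l with
  | nil => simp [PySem.Chars.join, List.intercalate]
  | cons x l ih =>
    cases l with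
    | nil => simp [PySem.Chars.join, List.intercalate]
    | cons y l => simpa [PySem.Chars.join_cons_cons] using ih

-- after an uppercase run B inserts no spaces: running with prev_upper = true
-- emits the run aRun collects, then continues with prev_upper = false
theorem bGo_true_eq (cs : List Char) :
    bGo true cs = (aRun cs).1 ++ bGo false (aRun cs).2 := by
  induction cs with
  | nil => simp [bGo, aRun]
  | cons c cs ih =>
    by_cases h : PySem.Chars.isupper c = true
    · simp [bGo, aRun, h, ih]
    · simp [bGo, aRun, h]

theorem flatten_aPieces_eq_bGo (cs : List Char) :
    (aPieces cs).flatten = bGo false cs := by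
  induction hn : cs.length using Nat.strong_induction_on generalizing cs with
  | _ n ih =>
    cases cs with
    | nil => simp [aPieces, bGo]
    | cons c cs =>
      by_cases h : PySem.Chars.isupper c = true
      · have hrec := ih ((aRun cs).2.length)
          (by simp only [← hn, List.length_cons]
              exact Nat.lt_succ_of_le (aRun_snd_length_le cs)) _ rfl
        simp [aPieces, bGo, h, bGo_true_eq, hrec]
      · have hrec := ih cs.length (by simp [← hn]) _ rfl
        simp [aPieces, bGo, h, hrec]

-- ===== VERDICT (by name: the statement is the Claim_ definition above) =====
theorem camel_case_to_human_readable_py_spec : Claim_equal_camel_case_to_human_readable_py := by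
  intro s _
  unfold Spec_camel_case_to_human_readable_py camel_case_to_human_readable_py
    camel_case_to_human_readable_py_alt
  rw [join_nil_eq_flatten, flatten_aPieces_eq_bGo]
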